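-- pv_equiv track=rewrite | github.com/WAR885/Datathon-2025 | calculate_total.py | calculate_total_item_popularities
-- ===== SOURCE A (Python) =====
-- def calculate_total_item_popularities(all_month_item_popularities:list[dict]):
--     items_popularity = {}
--     for i in range(len(all_month_item_popularities)):
--         for item in all_month_item_popularities[i].keys():
--             items_popularity[item] = 0
--     for month_item_pop in all_month_item_popularities:
--         for item in month_item_pop.keys():
--             items_popularity[item] += month_item_pop[item]
--     return items_popularity
-- ===== SOURCE B (Python) =====
-- def calculate_total_item_popularities(all_month_item_popularities: list[dict]):
--     # Pass 1: distinct items in first-occurrence order; Pass 2: per-item sum across months.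
--     items = []
--     seen = set()
--     for month in all_month_item_popularities:
--         for item in month:
--             if item not in seen:
--                 seen.add(item)
--                 items.append(item)
--     return {item: sum(month.get(item, 0) for month in all_month_item_popularities)
--             for item in items}
-- ===== Notes on version B (the rewrite author's own statement) =====
-- stated objective: alternative
-- what changed: Instead of A's accumulate-into-a-dict scheme (zero-init pass then in-place += per month), B first collects the distinct items in first-occurrence order and then computes each item's total independently by scanning the months per item (month.get(item, 0)), building the result in one dict comprehension with no mutable accumulator.
import Mathlib
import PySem

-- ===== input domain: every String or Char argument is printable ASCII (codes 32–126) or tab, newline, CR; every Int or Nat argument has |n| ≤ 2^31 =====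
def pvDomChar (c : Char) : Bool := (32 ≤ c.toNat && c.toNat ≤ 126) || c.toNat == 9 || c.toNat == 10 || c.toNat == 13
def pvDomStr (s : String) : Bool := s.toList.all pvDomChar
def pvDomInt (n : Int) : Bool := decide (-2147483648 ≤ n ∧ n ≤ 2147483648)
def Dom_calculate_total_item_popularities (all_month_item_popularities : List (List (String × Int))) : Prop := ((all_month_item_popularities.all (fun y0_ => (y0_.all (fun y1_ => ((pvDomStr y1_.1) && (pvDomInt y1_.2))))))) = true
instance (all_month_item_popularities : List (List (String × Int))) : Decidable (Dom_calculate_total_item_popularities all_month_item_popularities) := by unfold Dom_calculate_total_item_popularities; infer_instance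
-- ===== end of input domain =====

-- B replaces A's accumulate-into-a-dict scheme by a first-occurrence key pass plus an
-- independent per-key sum over the months; equivalence of the RETURN value is proved.

-- ===== PORT A =====
-- A: two passes — first zero-initialize every key (indexed loop), then add each month's value in place.
def calculate_total_item_popularities (all_month_item_popularities : List (List (String × Int))) : List (String × Int) :=
  let init : PySem.Dict String Int :=
    (PySem.List.pyRange 0 (all_month_item_popularities.length : Int) 1).foldl
      (fun d i =>
        (PySem.Dict.ofList (PySem.List.pyGetD all_month_item_popularities i [])).keys.foldl
          (fun d item => d.insert item (0 : Int)) d)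
      PySem.Dict.empty
  (all_month_item_popularities.foldl
    (fun d month_item_pop =>
      let dm := PySem.Dict.ofList month_item_pop
      dm.keys.foldl (fun d item => d.insert item (d.getD item 0 + dm.getD item 0)) d)
    init).items

-- ===== PORT B =====
-- B: collect the distinct items in first-occurrence order (a set drives the dedup), then
-- compute each item's total independently by scanning the months with month.get(item, 0).
def calculate_total_item_popularities_alt (all_month_item_popularities : List (List (String × Int))) : List (String × Int) :=
  let items : PySem.Set String :=
    all_month_item_popularities.foldl
      (fun s month => (PySem.Dict.ofList month).keys.foldl (fun s item => PySem.Set.add s item) s)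
      PySem.Set.empty
  items.map (fun item =>
    (item, (all_month_item_popularities.map (fun month => (PySem.Dict.ofList month).getD item 0)).sum))

-- ===== PRECONDITION & SPEC =====
def Spec_calculate_total_item_popularities (all_month_item_popularities : List (List (String × Int))) (out : List (String × Int)) : Prop := out = calculate_total_item_popularities_alt all_month_item_popularities
instance (all_month_item_popularities : List (List (String × Int))) (out : List (String × Int)) : Decidable (Spec_calculate_total_item_popularities all_month_item_popularities out) := by unfold Spec_calculate_total_item_popularities; infer_instance

-- ===== CLAIM (what is proved, stated in full; the proofs are below) =====
def Claim_equal_calculate_total_item_popularities : Prop := ∀ (all_month_item_popularities : List (List (String × Int))), Dom_calculate_total_item_popularities all_month_item_popularities → Spec_calculate_total_item_popularities all_month_item_popularities (calculate_total_item_popularities all_month_item_popularities)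

-- ===== LEMMAS AND PROOFS =====

-- A's accumulation step for one month.
def pvStep (d : PySem.Dict String Int) (m : List (String × Int)) : PySem.Dict String Int :=
  let dm := PySem.Dict.ofList m
  dm.keys.foldl (fun d item => d.insert item (d.getD item 0 + dm.getD item 0)) d

def pvAllKeys (ms : List (List (String × Int))) : List String :=
  ms.flatMap (fun m => (PySem.Dict.ofList m).keys)

-- getD through one add-pass over a nodup key list.
lemma pv_foldl_insert_add_getD (l : List String) (hl : l.Nodup) (dm d : PySem.Dict String Int) (x : String) :
    (l.foldl (fun d k => d.insert k (d.getD k 0 + dm.getD k 0)) d).getD x 0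
      = d.getD x 0 + (if x ∈ l then dm.getD x 0 else 0) := by
  induction l generalizing d with
  | nil => simp
  | cons k rest ih =>
    rcases List.nodup_cons.mp hl with ⟨hk, hrest⟩
    simp only [List.foldl_cons, ih hrest]
    by_cases hx : x = k
    · subst hx
      simp [hk]
    · simp [PySem.Dict.getD_insert, hx, List.mem_cons]

lemma pv_step_getD (d : PySem.Dict String Int) (m : List (String × Int)) (x : String) :
    (pvStep d m).getD x 0 = d.getD x 0 + (PySem.Dict.ofList m).getD x 0 := by
  unfold pvStep
  rw [pv_foldl_insert_add_getD _ (PySem.Dict.nodup_keys_ofList m)]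
  by_cases hx : x ∈ (PySem.Dict.ofList m).keys
  · simp [hx]
  · have : (PySem.Dict.ofList m).contains x = false := by
      by_contra h
      exact hx ((PySem.Dict.contains_iff_mem_keys _ _).mp (by simpa using h))
    simp [hx, PySem.Dict.getD_of_not_contains _ 0 this]

lemma pv_acc_getD (ms : List (List (String × Int))) (d : PySem.Dict String Int) (x : String) :
    (ms.foldl pvStep d).getD x 0
      = d.getD x 0 + (ms.map (fun m => (PySem.Dict.ofList m).getD x 0)).sum := by
  induction ms generalizing d with
  | nil => simp
  | cons m ms ih => simp [List.foldl_cons, ih, pv_step_getD]; ring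

-- getD through the zero-initialization pass.
lemma pv_foldl_insert_zero_getD (l : List String) (d : PySem.Dict String Int) (x : String) :
    (l.foldl (fun d k => d.insert k (0 : Int)) d).getD x 0 = if x ∈ l then 0 else d.getD x 0 := by
  induction l generalizing d with
  | nil => simp
  | cons k rest ih =>
    simp only [List.foldl_cons, ih]
    by_cases hx : x ∈ rest
    · simp [hx]
    · by_cases hk : x = k <;> simp [hx, hk, PySem.Dict.getD_insert]

lemma pv_init_getD (ms : List (List (String × Int))) (d : PySem.Dict String Int) (x : String) :
    (ms.foldl (fun d m => (PySem.Dict.ofList m).keys.foldl (fun d k => d.insert k (0 : Int)) d) d).getD x 0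
      = if x ∈ pvAllKeys ms then 0 else d.getD x 0 := by
  induction ms generalizing d with
  | nil => simp [pvAllKeys]
  | cons m ms ih =>
    have hsplit : x ∈ pvAllKeys (m :: ms) ↔ x ∈ (PySem.Dict.ofList m).keys ∨ x ∈ pvAllKeys ms := by
      simp [pvAllKeys]
    simp only [List.foldl_cons, ih, pv_foldl_insert_zero_getD]
    by_cases h1 : x ∈ pvAllKeys ms <;> by_cases h2 : x ∈ (PySem.Dict.ofList m).keys <;>
      simp [hsplit, h1, h2]

-- keys of A's two passes.
lemma pv_acc_keys (ms : List (List (String × Int))) (d : PySem.Dict String Int) :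
    (ms.foldl pvStep d).keys = PySem.Set.update d.keys (pvAllKeys ms) := by
  induction ms generalizing d with
  | nil => simp [pvAllKeys, PySem.Set.update_nil]
  | cons m ms ih =>
    have : pvAllKeys (m :: ms) = (PySem.Dict.ofList m).keys ++ pvAllKeys ms := by
      simp [pvAllKeys]
    rw [List.foldl_cons, ih, this, PySem.Set.update_append]
    congr 1
    exact PySem.Dict.keys_foldl_insert _ _ _

lemma pv_init_keys (ms : List (List (String × Int))) (d : PySem.Dict String Int) :
    (ms.foldl (fun d m => (PySem.Dict.ofList m).keys.foldl (fun d k => d.insert k (0 : Int)) d) d).keys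
      = PySem.Set.update d.keys (pvAllKeys ms) := by
  induction ms generalizing d with
  | nil => simp [pvAllKeys, PySem.Set.update_nil]
  | cons m ms ih =>
    have : pvAllKeys (m :: ms) = (PySem.Dict.ofList m).keys ++ pvAllKeys ms := by
      simp [pvAllKeys]
    rw [List.foldl_cons, ih, this, PySem.Set.update_append]
    congr 1
    exact PySem.Dict.keys_foldl_insert _ _ _

-- B's key pass is the ordered-set update with all keys.
lemma pv_b_keys (ms : List (List (String × Int))) (s : PySem.Set String) :
    ms.foldl (fun s m => (PySem.Dict.ofList m).keys.foldl (fun s k => PySem.Set.add s k) s) s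
      = PySem.Set.update s (pvAllKeys ms) := by
  induction ms generalizing s with
  | nil => simp [pvAllKeys, PySem.Set.update_nil]
  | cons m ms ih =>
    have : pvAllKeys (m :: ms) = (PySem.Dict.ofList m).keys ++ pvAllKeys ms := by
      simp [pvAllKeys]
    rw [List.foldl_cons, ih, this, PySem.Set.update_append]
    rfl

-- updating a set with elements it already contains changes nothing.
lemma pv_update_self (xs : List String) :
    PySem.Set.update (PySem.Set.ofList xs) xs = PySem.Set.ofList xs := by
  rw [PySem.Set.update_eq_append_filter]
  have : (PySem.Set.ofList xs).filter (fun y => !(PySem.Set.contains (PySem.Set.ofList xs) y)) = [] := by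
    rw [List.filter_eq_nil_iff]
    intro y hy
    simpa [PySem.Set.contains] using hy
  rw [this, List.append_nil]

-- nodup keys after the passes.
lemma pv_acc_nodup (ms : List (List (String × Int))) (d : PySem.Dict String Int)
    (h : d.keys.Nodup) : (ms.foldl pvStep d).keys.Nodup := by
  induction ms generalizing d with
  | nil => simpa
  | cons m ms ih =>
    exact ih _ (PySem.Dict.nodup_keys_foldl_insert _ _ _ h)

lemma pv_init_nodup (ms : List (List (String × Int))) (d : PySem.Dict String Int)
    (h : d.keys.Nodup) :
    (ms.foldl (fun d m => (PySem.Dict.ofList m).keys.foldl (fun d k => d.insert k (0 : Int)) d) d).keys.Nodup := by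
  induction ms generalizing d with
  | nil => simpa
  | cons m ms ih =>
    exact ih _ (PySem.Dict.nodup_keys_foldl_insert _ _ _ h)

-- ===== VERDICT (by name: the statement is the Claim_ definition above) =====
theorem calculate_total_item_popularities_spec : Claim_equal_calculate_total_item_popularities := by
  intro ms _
  unfold Spec_calculate_total_item_popularities
  simp only [calculate_total_item_popularities, calculate_total_item_popularities_alt]
  rw [PySem.List.foldl_pyRange_zero_pyGetD' ms []
        (fun d m => (PySem.Dict.ofList m).keys.foldl (fun d k => d.insert k (0 : Int)) d)
        PySem.Dict.empty]
  set init := ms.foldl (fun d m => (PySem.Dict.ofList m).keys.foldl (fun d k => d.insert k (0 : Int)) d) PySem.Dict.empty with hinit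
  have hA := pv_acc_nodup ms init (by rw [hinit]; exact pv_init_nodup ms _ (by simp [PySem.Dict.keys_empty]))
  show (ms.foldl pvStep init).items
      = (ms.foldl (fun s m => (PySem.Dict.ofList m).keys.foldl (fun s k => PySem.Set.add s k) s) PySem.Set.empty).map
          (fun item => (item, (ms.map (fun month => (PySem.Dict.ofList month).getD item 0)).sum))
  rw [PySem.Dict.items_eq_map_keys _ hA 0]
  have hkeys : (ms.foldl pvStep init).keys = PySem.Set.update PySem.Set.empty (pvAllKeys ms) := by
    rw [pv_acc_keys, hinit, pv_init_keys]
    simp only [PySem.Dict.keys_empty, PySem.Set.update_nil_left]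
    exact pv_update_self _
  rw [hkeys, pv_b_keys]
  apply List.map_congr_left
  intro k hk
  have h1 := pv_acc_getD ms init k
  have h3 : init.getD k 0 = 0 := by
    rw [hinit, pv_init_getD]
    split <;> simp [PySem.Dict.getD_empty]
  simp [h1, h3]
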